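-- pv_equiv track=rewrite | github.com/tltx/seagulls_button | spotify_credentials.py | parse_qsl
-- ===== SOURCE A (Python) =====
-- def parse_qsl(qs):
--     pairs = [s2 for s1 in qs.split('&') for s2 in s1.split(';')]
--     r = []
--     for name_value in pairs:
--         if not name_value:
--             continue
--         nv = name_value.split('=', 1)
--         if len(nv) != 2:
--             continue
--         if len(nv[1]):
--             name = nv[0].replace('+', ' ')
--             name = unquote(name)
--             value = nv[1].replace('+', ' ')
--             value = unquote(value)
--             r.append((name, value))
--     return r
--
-- def unquote(s):
--     res = s.split('%')
--     for i in range(1, len(res)):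
--         item = res[i]
--         try:
--             res[i] = chr(int(item[:2], 16)) + item[2:]
--         except ValueError:
--             res[i] = '%' + item
--     return "".join(res)
-- ===== SOURCE B (Python) =====
-- def unquote(s):
--     out = []
--     i = 0
--     n = len(s)
--     while i < n:
--         if s[i] != '%':
--             j = i
--             while j < n and s[j] != '%':
--                 j += 1
--             out.append(s[i:j])
--             i = j
--         else:
--             k = i + 1
--             while k < n and k < i + 3 and s[k] != '%':
--                 k += 1
--             cand = s[i+1:k]
--             try:
--                 out.append(chr(int(cand, 16)))
--                 i = k
--             except ValueError:
--                 out.append('%')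
--                 i += 1
--     return ''.join(out)
--
-- def parse_qsl(qs):
--     r = []
--     for part in qs.replace(';', '&').split('&'):
--         eq = part.find('=')
--         if eq < 0:
--             continue
--         value = part[eq+1:]
--         if value:
--             r.append((unquote(part[:eq].replace('+', ' ')),
--                       unquote(value.replace('+', ' '))))
--     return r
-- ===== Notes on version B (the rewrite author's own statement) =====
-- stated objective: alternative
-- what changed: unquote is re-done as a single left-to-right index scanner (literal run up to the next percent sign, then one chr(int(..,16)) attempt on the up-to-2-char candidate) instead of split-on-percent-and-rejoin, and parse_qsl normalises semicolons to ampersands and splits once instead of nested splits, cutting each pair at the first equals sign via find instead of a maxsplit-1 split.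
import Mathlib
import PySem

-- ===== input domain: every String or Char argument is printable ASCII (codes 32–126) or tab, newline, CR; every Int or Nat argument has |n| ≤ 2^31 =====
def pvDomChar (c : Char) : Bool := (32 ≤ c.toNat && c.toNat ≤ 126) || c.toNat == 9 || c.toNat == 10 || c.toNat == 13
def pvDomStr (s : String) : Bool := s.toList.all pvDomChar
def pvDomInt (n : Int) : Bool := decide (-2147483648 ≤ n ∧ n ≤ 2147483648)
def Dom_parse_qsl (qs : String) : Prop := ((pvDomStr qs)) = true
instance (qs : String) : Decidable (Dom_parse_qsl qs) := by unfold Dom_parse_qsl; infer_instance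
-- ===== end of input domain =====

-- B replaces both split-based passes: unquote becomes a left-to-right scanner (literal runs + one decode attempt
-- per '%') instead of split('%')-and-rejoin, and the pair loop splits once on '&' after replacing ';' and cuts each
-- pair at the first '=' found, instead of nested splits plus split('=', 1). Objective: alternative (same cost).

-- chr(int(cs, 16)) with ValueError as none — the exact expression both Pythons evaluate on a candidate of ≤ 2 chars;
-- exact: int via PySem.Int.ofCharsBase?, and a successful ≤2-char base-16 parse is < 0x110000, so chr fails only for < 0.
def hexChr? (cs : List Char) : Option Char :=
  match PySem.Int.ofCharsBase? cs 16 with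
  | none => none
  | some v => if v < 0 then none else some (Char.ofNat v.toNat)

-- ===== PORT A =====
-- unquote: res = s.split('%'); res[i] (i ≥ 1) rewritten in place (here: map over the tail), then "".join(res)
def unquoteA (s : List Char) : List Char :=
  match PySem.Chars.splitOn s ['%'] with
  | [] => []
  | h :: t =>
      PySem.Chars.join [] (h :: t.map (fun item =>
        match hexChr? (PySem.Chars.slice item none (some 2)) with
        | some c => c :: PySem.Chars.slice item (some 2) none
        | none => '%' :: item))

def parse_qsl (qs : String) : List (String × String) :=
  let pairs := (PySem.Chars.splitOn qs.toList ['&']).flatMap (fun s1 => PySem.Chars.splitOn s1 [';'])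
  pairs.foldl (fun r name_value =>
    if name_value.isEmpty then r
    else
      match PySem.Chars.splitOnMax name_value ['='] 1 with
      | [n0, v0] =>
        if v0.length ≠ 0 then
          let name := unquoteA (PySem.Chars.replace n0 ['+'] [' '])
          let value := unquoteA (PySem.Chars.replace v0 ['+'] [' '])
          r ++ [(String.ofList name, String.ofList value)]
        else r
      | _ => r) []

-- ===== PORT B =====
-- unquote as a scanner over the remaining suffix: a literal run up to the next '%' (the inner `while j` loop =
-- takeWhile/dropWhile), or at a '%' the ≤2-char candidate cut at the next '%' (the `while k` loop), one decode try.
def unquoteB (l : List Char) : List Char :=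
  match l with
  | [] => []
  | c :: t =>
    if c ≠ '%' then
      ((c :: t).takeWhile (· ≠ '%')) ++ unquoteB ((c :: t).dropWhile (· ≠ '%'))
    else
      let cand := (t.takeWhile (· ≠ '%')).take 2
      match hexChr? cand with
      | some ch => ch :: unquoteB (t.drop cand.length)
      | none => '%' :: unquoteB t
  termination_by l.length
  decreasing_by
  · simpa [List.dropWhile_cons, *] using
      Nat.lt_succ_of_le (List.length_dropWhile_le (fun x => decide (x ≠ '%')) t)
  · simp only [List.length_drop, List.length_cons]; omega
  · simp

def parse_qsl_alt (qs : String) : List (String × String) :=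
  (PySem.Chars.splitOn (PySem.Chars.replace qs.toList [';'] ['&']) ['&']).foldl
    (fun r part =>
      let eq := PySem.Chars.find part ['=']
      if eq < 0 then r
      else
        let value := PySem.Chars.slice part (some (eq + 1)) none
        if value.isEmpty then r
        else
          let name := unquoteB (PySem.Chars.replace (PySem.Chars.slice part none (some eq)) ['+'] [' '])
          r ++ [(String.ofList name, String.ofList (unquoteB (PySem.Chars.replace value ['+'] [' '])))]) []

-- ===== PRECONDITION & SPEC =====
def Spec_parse_qsl (qs : String) (out : List (String × String)) : Prop := out = parse_qsl_alt qs
instance (qs : String) (out : List (String × String)) : Decidable (Spec_parse_qsl qs out) := by unfold Spec_parse_qsl; infer_instance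

-- ===== CLAIM (what is proved, stated in full; the proofs are below) =====
def Claim_equal_parse_qsl : Prop := ∀ (qs : String), Dom_parse_qsl qs → Spec_parse_qsl qs (parse_qsl qs)

-- ===== LEMMAS AND PROOFS =====

def pySplitC (c : Char) : List Char → List (List Char)
  | [] => [[]]
  | a :: t => if a = c then [] :: pySplitC c t else (pySplitC c t).modifyHead (a :: ·)

-- A's per-item rewrite, with the slices evaluated.
def uqStep (item : List Char) : List Char :=
  match hexChr? (item.take 2) with
  | some c => c :: item.drop 2
  | none => '%' :: item

-- common normal form of both unquotes: literal prefix, then one rewritten block per '%'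
def uqN (l : List Char) : List Char :=
  l.takeWhile (· ≠ '%') ++
    (match l.dropWhile (· ≠ '%') with
     | [] => []
     | _ :: u => ((pySplitC '%' u).map uqStep).flatten)

lemma pySplitC_ne_nil (c : Char) (l : List Char) : pySplitC c l ≠ [] := by
  cases l with
  | nil => simp [pySplitC]
  | cons a t =>
    by_cases h : a = c
    · simp [pySplitC, h]
    · simp only [pySplitC, if_neg h]
      intro hh
      exact pySplitC_ne_nil c t (by simpa using List.modifyHead_eq_nil_iff.mp hh)

lemma splitOn_go_single (c : Char) :
    ∀ (fuel : Nat) (l cur : List Char) (acc : List (List Char)), l.length < fuel →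
      PySem.Chars.splitOn.go [c] fuel l cur acc
        = acc.reverse ++ (pySplitC c l).modifyHead (cur.reverse ++ ·) := by
  intro fuel
  induction fuel with
  | zero => intro l cur acc h; omega
  | succ f ih =>
    intro l cur acc h
    cases l with
    | nil => simp [PySem.Chars.splitOn.go, pySplitC]
    | cons a t =>
      rw [PySem.Chars.splitOn.go]
      simp only [List.isPrefixOf, List.isPrefixOf_nil_left, Bool.and_true]
      by_cases hac : c = a
      · rw [if_pos (by simp [hac])]
        rw [ih _ _ _ (by simpa using Nat.lt_of_succ_lt_succ h)]
        simp only [pySplitC, if_pos hac.symm]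
        have hd : List.drop [c].length (a :: t) = t := by simp
        rw [hd]
        cases pySplitC c t <;> simp
      · rw [if_neg (by simp [hac])]
        rw [ih _ _ _ (by simpa using h)]
        have hne : a ≠ c := fun hh => hac hh.symm
        simp only [pySplitC, if_neg hne]
        rcases hl : pySplitC c t with _ | ⟨h0, t0⟩
        · exact absurd hl (pySplitC_ne_nil c t)
        · simp

lemma splitOn_single (c : Char) (s : List Char) :
    PySem.Chars.splitOn s [c] = pySplitC c s := by
  rw [PySem.Chars.splitOn, splitOn_go_single c _ _ _ _ (by omega)]
  rcases hl : pySplitC c s with _ | ⟨h0, t0⟩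
  · exact absurd hl (pySplitC_ne_nil c s)
  · simp


lemma pySplitC_eq_takeWhile (c : Char) (l : List Char) :
    pySplitC c l = (l.takeWhile (· ≠ c)) ::
      (match l.dropWhile (· ≠ c) with
       | [] => []
       | _ :: u => pySplitC c u) := by
  induction l with
  | nil => simp [pySplitC]
  | cons a t ih =>
    by_cases h : a = c
    · simp [pySplitC, h, List.takeWhile_cons, List.dropWhile_cons]
    · simp only [pySplitC, if_neg h, List.takeWhile_cons, List.dropWhile_cons]
      rw [ih]
      simp [h]

lemma splitOnMax_go_zero (c : Char) (fuel : Nat) (l cur : List Char) (acc : List (List Char)) :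
    PySem.Chars.splitOnMax.go [c] fuel 0 l cur acc = acc.reverse ++ [cur.reverse ++ l] := by
  cases fuel with
  | zero => rw [PySem.Chars.splitOnMax.go]; simp
  | succ f =>
    cases l with
    | nil => rw [PySem.Chars.splitOnMax.go]; simp; omega
    | cons a t => rw [PySem.Chars.splitOnMax.go]; simp

lemma splitOnMax_go_one (c : Char) :
    ∀ (fuel : Nat) (l cur : List Char) (acc : List (List Char)), l.length < fuel →
      PySem.Chars.splitOnMax.go [c] fuel 1 l cur acc
        = acc.reverse ++ (match l.dropWhile (· ≠ c) with
          | [] => [cur.reverse ++ l]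
          | _ :: u => [cur.reverse ++ l.takeWhile (· ≠ c), u]) := by
  intro fuel
  induction fuel with
  | zero => intro l cur acc h; omega
  | succ f ih =>
    intro l cur acc h
    cases l with
    | nil => rw [PySem.Chars.splitOnMax.go]; simp; omega
    | cons a t =>
      rw [PySem.Chars.splitOnMax.go]
      simp only [List.isPrefixOf, List.isPrefixOf_nil_left, Bool.and_true, List.takeWhile_cons, List.dropWhile_cons]
      by_cases hac : c = a
      · rw [if_neg (by simp), if_pos (by simp [hac])]
        rw [splitOnMax_go_zero]
        subst hac
        simp
      · rw [if_neg (by simp), if_neg (by simp [hac])]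
        rw [ih _ _ _ (by simpa using h)]
        have hne : a ≠ c := fun hh => hac hh.symm
        rcases hdw : t.dropWhile (· ≠ c) with _ | ⟨x, u⟩ <;> simp [hne, hdw]

lemma splitOnMax_one (c : Char) (s : List Char) :
    PySem.Chars.splitOnMax s [c] 1
      = (match s.dropWhile (· ≠ c) with
         | [] => [s]
         | _ :: u => [s.takeWhile (· ≠ c), u]) := by
  rw [PySem.Chars.splitOnMax, if_neg (by norm_num)]
  rw [show (1:Int).toNat = 1 from rfl]
  rw [splitOnMax_go_one c _ _ _ _ (by omega)]
  rcases hdw : s.dropWhile (· ≠ c) with _ | ⟨x, u⟩ <;> simp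

lemma find_go_single (c : Char) :
    ∀ (l : List Char) (k : Nat),
      PySem.Chars.find.go [c] l k
        = (match l.dropWhile (· ≠ c) with
           | [] => -1
           | _ :: _ => ((k : Int) + (l.takeWhile (· ≠ c)).length)) := by
  intro l
  induction l with
  | nil => intro k; rw [PySem.Chars.find.go]; simp
  | cons a t ih =>
    intro k
    rw [PySem.Chars.find.go]
    simp only [List.isPrefixOf, List.isPrefixOf_nil_left, Bool.and_true, List.takeWhile_cons, List.dropWhile_cons]
    by_cases hac : c = a
    · rw [if_pos (by simp [hac])]
      simp [hac.symm]
    · rw [if_neg (by simp [hac])]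
      rw [ih]
      have hne : a ≠ c := fun hh => hac hh.symm
      rcases hdw : t.dropWhile (· ≠ c) with _ | ⟨x, u⟩ <;> simp [hne, hdw]
      push_cast
      ring

lemma find_single (c : Char) (s : List Char) :
    PySem.Chars.find s [c]
      = (match s.dropWhile (· ≠ c) with
         | [] => -1
         | _ :: _ => ((s.takeWhile (· ≠ c)).length : Int)) := by
  rw [PySem.Chars.find, find_go_single]
  rcases hdw : s.dropWhile (· ≠ c) with _ | ⟨x, u⟩ <;> simp

lemma replace_go_single (a b : Char) :
    ∀ (fuel : Nat) (l acc : List Char), l.length ≤ fuel →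
      PySem.Chars.replace.go [a] [b] fuel l acc
        = acc.reverse ++ l.map (fun x => if x = a then b else x) := by
  intro fuel
  induction fuel with
  | zero =>
    intro l acc h
    have : l = [] := List.eq_nil_of_length_eq_zero (by omega)
    subst this
    rw [PySem.Chars.replace.go]; simp
  | succ f ih =>
    intro l acc h
    cases l with
    | nil => rw [PySem.Chars.replace.go]; simp; omega
    | cons x t =>
      rw [PySem.Chars.replace.go]
      simp only [List.isPrefixOf, List.isPrefixOf_nil_left, Bool.and_true]
      by_cases hax : a = x
      · rw [if_pos (by simp [hax])]
        rw [ih _ _ (by simpa using Nat.le_of_succ_le_succ h)]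
        simp [hax.symm]
      · rw [if_neg (by simp [hax])]
        rw [ih _ _ (by simpa using Nat.le_of_succ_le_succ h)]
        have hne : x ≠ a := fun hh => hax hh.symm
        simp [hne]

lemma replace_single (a b : Char) (s : List Char) :
    PySem.Chars.replace s [a] [b] = s.map (fun x => if x = a then b else x) := by
  rw [PySem.Chars.replace, if_neg (by simp)]
  rw [replace_go_single a b _ _ _ (le_refl _)]
  simp


lemma takeWhile_dropWhile_nil (p : Char → Bool) (l : List Char) :
    (l.dropWhile p).takeWhile p = [] := by
  induction l with
  | nil => simp
  | cons a t ih =>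
    by_cases h : p a
    · simpa [List.dropWhile_cons, h] using ih
    · simp [List.dropWhile_cons, h, List.takeWhile_cons, h]

-- flatten of the mapped pySplitC, one '%'-block peeled
lemma flat_peel (u : List Char) :
    ((pySplitC '%' u).map uqStep).flatten
      = uqStep (u.takeWhile (· ≠ '%')) ++
          (match u.dropWhile (· ≠ '%') with
           | [] => []
           | _ :: v => ((pySplitC '%' v).map uqStep).flatten) := by
  rw [pySplitC_eq_takeWhile]
  rcases hdw : u.dropWhile (· ≠ '%') with _ | ⟨x, v⟩ <;> simp

lemma drop_take2_len (x : List Char) : x.drop (x.take 2).length = x.drop 2 := by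
  rcases Nat.lt_or_ge x.length 2 with h | h
  · have h1 : (x.take 2).length = x.length := by simp [List.length_take]; omega
    rw [h1, List.drop_length, List.drop_eq_nil_of_le (by omega)]
  · simp [List.length_take, min_eq_left h]

lemma drop_takeWhile_split (p : Char → Bool) (l : List Char) (k : Nat)
    (hk : k ≤ (l.takeWhile p).length) :
    l.drop k = (l.takeWhile p).drop k ++ l.dropWhile p := by
  conv_lhs => rw [← List.takeWhile_append_dropWhile (p := p) (l := l)]
  rw [List.drop_append_of_le_length hk]

lemma unquoteB_eq_uqN_aux : ∀ (n : Nat) (l : List Char), l.length ≤ n → unquoteB l = uqN l := by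
  intro n
  induction n with
  | zero =>
    intro l h
    have : l = [] := List.eq_nil_of_length_eq_zero (by omega)
    subst this
    rw [unquoteB]; simp [uqN]
  | succ n ih =>
    intro l h
    cases l with
    | nil => rw [unquoteB]; simp [uqN]
    | cons c t =>
      have ht : t.length ≤ n := by simpa using Nat.le_of_succ_le_succ h
      rw [unquoteB]
      by_cases hc : c = '%'
      · subst hc
        simp only [ne_eq, not_true_eq_false, if_false, reduceIte]
        have huq : uqN ('%' :: t)
            = uqStep (t.takeWhile (· ≠ '%')) ++
              (match t.dropWhile (· ≠ '%') with
               | [] => []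
               | _ :: v => ((pySplitC '%' v).map uqStep).flatten) := by
          rw [uqN]
          simp only [List.takeWhile_cons, List.dropWhile_cons, ne_eq, not_true_eq_false,
            decide_false, Bool.false_eq_true, if_false, List.nil_append]
          exact flat_peel t
        rcases hx : hexChr? ((t.takeWhile (· ≠ '%')).take 2) with _ | ch
        · -- ValueError: emit '%' and rescan t
          rw [ih t ht, huq]
          simp only [uqStep, hx]
          simp [uqN]
        · -- success: emit the char, skip the candidate
          have hkle : ((t.takeWhile (· ≠ '%')).take 2).length ≤ (t.takeWhile (· ≠ '%')).length := by
            simp [List.length_take]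
          have hsplit := drop_takeWhile_split (fun x => decide (x ≠ '%')) t
            ((t.takeWhile (· ≠ '%')).take 2).length hkle
          have hall : ∀ a ∈ (t.takeWhile (· ≠ '%')).drop ((t.takeWhile (· ≠ '%')).take 2).length,
              ((· ≠ '%') a : Bool) := by
            intro a ha
            simpa using List.mem_takeWhile_imp (List.mem_of_mem_drop ha)
          rw [ih _ (le_trans (by simpa using List.length_drop_le _ _) ht), huq]
          simp only [uqStep, hx]
          rw [uqN, hsplit]
          rw [List.takeWhile_append_of_pos hall, List.dropWhile_append_of_pos hall,
              takeWhile_dropWhile_nil, List.dropWhile_idempotent]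
          rw [drop_take2_len]
          simp
      · rw [if_pos (by simpa using hc)]
        have hdw : (c :: t).dropWhile (· ≠ '%') = t.dropWhile (· ≠ '%') := by
          simp [List.dropWhile_cons, hc]
        rw [hdw, ih (t.dropWhile (· ≠ '%')) (le_trans (List.length_dropWhile_le _ _) ht)]
        rw [uqN, takeWhile_dropWhile_nil, List.dropWhile_idempotent]
        rw [uqN, ← hdw]
        rcases hd : (c :: t).dropWhile (· ≠ '%') with _ | ⟨x, u⟩ <;> simp

lemma unquoteB_eq_uqN (l : List Char) : unquoteB l = uqN l :=
  unquoteB_eq_uqN_aux l.length l (le_refl _)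


lemma flatten_intersperse_nil (parts : List (List Char)) :
    (List.intersperse ([] : List Char) parts).flatten = parts.flatten := by
  induction parts with
  | nil => simp
  | cons a t ih =>
    cases t with
    | nil => simp
    | cons b u =>
      simp only [List.intersperse]
      simpa using ih

lemma modifyHead_append_of_ne_nil (f : List Char → List Char) (x y : List (List Char)) (h : x ≠ []) :
    (x ++ y).modifyHead f = x.modifyHead f ++ y := by
  cases x with
  | nil => exact absurd rfl h
  | cons a t => simp

lemma pySplitC_map_semi (l : List Char) :
    pySplitC '&' (l.map (fun x => if x = ';' then '&' else x))
      = (pySplitC '&' l).flatMap (pySplitC ';') := by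
  induction l with
  | nil => simp [pySplitC]
  | cons a t ih =>
    by_cases ha : a = '&'
    · subst ha
      simp only [List.map_cons, if_neg (show ('&':Char) ≠ ';' by decide), pySplitC, if_pos rfl]
      rw [ih]
      rcases hs : pySplitC '&' t with _ | ⟨h0, r⟩
      · exact absurd hs (pySplitC_ne_nil _ _)
      · simp [pySplitC]
    · by_cases hsemi : a = ';'
      · subst hsemi
        simp only [List.map_cons, if_pos rfl, pySplitC, if_pos rfl]
        rw [ih]
        rcases hs : pySplitC '&' t with _ | ⟨h0, r⟩
        · exact absurd hs (pySplitC_ne_nil _ _)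
        · simp only [List.flatMap_cons, List.modifyHead_cons]
          simp [pySplitC]
      · simp only [List.map_cons, if_neg hsemi, pySplitC, if_neg ha]
        rw [ih]
        rcases hs : pySplitC '&' t with _ | ⟨h0, r⟩
        · exact absurd hs (pySplitC_ne_nil _ _)
        · simp only [List.flatMap_cons, List.modifyHead_cons]
          rw [modifyHead_append_of_ne_nil _ _ _ (pySplitC_ne_nil _ _)]
          simp only [pySplitC, if_neg ha, List.flatMap_cons]
          rcases hs2 : pySplitC ';' h0 with _ | ⟨g0, r2⟩
          · exact absurd hs2 (pySplitC_ne_nil _ _)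
          · simp [if_neg hsemi]


lemma unquoteA_eq_uqN (s : List Char) : unquoteA s = uqN s := by
  rw [unquoteA, splitOn_single, pySplitC_eq_takeWhile]
  rw [uqN]
  rcases hdw : s.dropWhile (· ≠ '%') with _ | ⟨x, u⟩
  · simp [PySem.Chars.join, List.intercalate]
  · simp only [PySem.Chars.join, List.intercalate]
    rw [flatten_intersperse_nil]
    simp only [List.flatten_cons]
    have hstep : (fun item => match hexChr? (PySem.Chars.slice item none (some 2)) with
        | some c => c :: PySem.Chars.slice item (some 2) none
        | none => '%' :: item) = uqStep := by
      funext item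
      simp [uqStep, pysem]
    rw [hstep]

lemma unquoteB_eq_unquoteA (s : List Char) : unquoteB s = unquoteA s := by
  rw [unquoteA_eq_uqN, unquoteB_eq_uqN]

-- ===== VERDICT (by name: the statement is the Claim_ definition above) =====
lemma dropWhile_head_eq (p : Char → Bool) (l u : List Char) (x : Char)
    (h : l.dropWhile p = x :: u) : p x = false := by
  have := List.head_dropWhile_not p (l := l) (by simp [h])
  simpa [h] using this

lemma body_eq (r : List (String × String)) (part : List Char) :
    (if part.isEmpty then r
     else
       match PySem.Chars.splitOnMax part ['='] 1 with
       | [n0, v0] =>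
         if v0.length ≠ 0 then
           r ++ [(String.ofList (unquoteA (PySem.Chars.replace n0 ['+'] [' '])),
                  String.ofList (unquoteA (PySem.Chars.replace v0 ['+'] [' '])))]
         else r
       | _ => r)
    = (let eq := PySem.Chars.find part ['=']
       if eq < 0 then r
       else
         let value := PySem.Chars.slice part (some (eq + 1)) none
         if value.isEmpty then r
         else
           let name := unquoteB (PySem.Chars.replace (PySem.Chars.slice part none (some eq)) ['+'] [' '])
           r ++ [(String.ofList name,
                  String.ofList (unquoteB (PySem.Chars.replace value ['+'] [' '])))]) := by
  rw [splitOnMax_one, find_single]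
  rcases hdw : part.dropWhile (· ≠ '=') with _ | ⟨x, u⟩
  · simp
  · have hx : x = '=' := by
      have := dropWhile_head_eq _ _ _ _ hdw
      simpa using this
    subst hx
    have heq : part = part.takeWhile (· ≠ '=') ++ '=' :: u := by
      conv_lhs => rw [← List.takeWhile_append_dropWhile (p := (· ≠ '=')) (l := part)]
      rw [hdw]
    generalize hg : part.takeWhile (· ≠ '=') = tw at heq ⊢
    rw [heq]
    have hne : (tw ++ '=' :: u).isEmpty = false := by cases tw <;> simp
    have hnotlt : ¬ ((tw.length : Int) < 0) := not_lt.mpr (Int.natCast_nonneg _)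
    have hvalue : PySem.Chars.slice (tw ++ '=' :: u) (some ((tw.length : Int) + 1)) none = u := by
      have h1 : ((tw.length : Int) + 1) = ((tw.length + 1 : Nat) : Int) := by push_cast; ring
      rw [h1]
      simp only [pysem]
      simpa using List.drop_length_add_append 1 tw ('=' :: u)
    have hname : PySem.Chars.slice (tw ++ '=' :: u) none (some (tw.length : Int)) = tw := by
      simp only [pysem]
      exact List.take_left
    simp only [hne, Bool.false_eq_true, if_false, if_neg hnotlt, hvalue, hname,
      unquoteB_eq_unquoteA]
    cases u with
    | nil => simp
    | cons y v => simp

-- ===== VERDICT (by name: the statement is the Claim_ definition above) =====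
theorem parse_qsl_spec : Claim_equal_parse_qsl := by
  intro qs _hdom
  unfold Spec_parse_qsl
  simp only [parse_qsl, parse_qsl_alt]
  have hlists : PySem.Chars.splitOn (PySem.Chars.replace qs.toList [';'] ['&']) ['&']
      = (PySem.Chars.splitOn qs.toList ['&']).flatMap (fun s1 => PySem.Chars.splitOn s1 [';']) := by
    rw [replace_single, splitOn_single, pySplitC_map_semi]
    simp only [splitOn_single]
  rw [hlists]
  have hfun : (fun (r : List (String × String)) (name_value : List Char) =>
      if name_value.isEmpty then r
      else
        match PySem.Chars.splitOnMax name_value ['='] 1 with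
        | [n0, v0] =>
          if v0.length ≠ 0 then
            r ++ [(String.ofList (unquoteA (PySem.Chars.replace n0 ['+'] [' '])),
                   String.ofList (unquoteA (PySem.Chars.replace v0 ['+'] [' '])))]
          else r
        | _ => r)
      = (fun (r : List (String × String)) (part : List Char) =>
        let eq := PySem.Chars.find part ['=']
        if eq < 0 then r
        else
          let value := PySem.Chars.slice part (some (eq + 1)) none
          if value.isEmpty then r
          else
            let name := unquoteB (PySem.Chars.replace (PySem.Chars.slice part none (some eq)) ['+'] [' '])
            r ++ [(String.ofList name,
                   String.ofList (unquoteB (PySem.Chars.replace value ['+'] [' '])))]) := by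
    funext r part
    exact body_eq r part
  rw [hfun]
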